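-- pv_equiv track=rewrite | github.com/EarthTan/tool-documentsConverter | tools/ball_valume_one.py | _groups_lines_from_digits
-- ===== SOURCE A (Python) =====
-- def _groups_lines_from_digits(digits: str) -> list[str]:
--     """Return list of formatted lines (no leading '0.') from digit string."""
--     if not digits:
--         return []
--     groups = [digits[i:i+4] for i in range(0, len(digits), 4)]
--     lines: list[str] = []
--     for i in range(0, len(groups), 2):
--         lines.append((" ".join(groups[i:i+2])).rstrip())
--     return lines
-- ===== SOURCE B (Python) =====
-- def _groups_lines_from_digits(digits: str) -> list[str]:
--     """Return list of formatted lines (no leading '0.') from digit string."""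
--     if not digits:
--         return []
--     lines: list[str] = []
--     for i in range(0, len(digits), 8):
--         block = digits[i:i+8]
--         line = block[:4] if len(block) <= 4 else block[:4] + " " + block[4:]
--         lines.append(line.rstrip())
--     return lines
-- ===== Notes on version B (the rewrite author's own statement) =====
-- stated objective: simpler
-- what changed: Replaces A's two sequential passes (build the list of 4-char groups, then join pairs of groups) with a single pass over 8-char blocks that emits each formatted line directly.
import Mathlib
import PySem

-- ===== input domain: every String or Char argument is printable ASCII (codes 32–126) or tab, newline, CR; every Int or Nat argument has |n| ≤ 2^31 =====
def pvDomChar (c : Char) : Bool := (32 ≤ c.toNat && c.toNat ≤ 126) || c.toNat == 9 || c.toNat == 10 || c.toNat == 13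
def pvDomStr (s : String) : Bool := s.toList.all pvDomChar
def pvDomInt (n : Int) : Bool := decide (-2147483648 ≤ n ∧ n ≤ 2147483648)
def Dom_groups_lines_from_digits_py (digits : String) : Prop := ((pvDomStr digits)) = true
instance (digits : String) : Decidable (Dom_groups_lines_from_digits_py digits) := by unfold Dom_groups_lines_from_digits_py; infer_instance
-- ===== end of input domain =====

-- B replaces A's two passes (build 4-char groups, then join pairs) by a single pass over
-- 8-char blocks that emits each line directly; same return value on every input (objective: simpler).

-- ===== PORT A =====
def groups_lines_from_digits_py (digits : String) : List String :=
  if digits = "" then []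
  else
    let groups : List String :=
      (PySem.List.pyRange 0 (PySem.Str.len digits) 4).map
        (fun i => PySem.Str.slice digits (some i) (some (i + 4)))
    (PySem.List.pyRange 0 ((groups.length : Int)) 2).foldl
      (fun lines i =>
        lines ++ [PySem.Str.rstrip
          (PySem.Str.join " " (PySem.List.slice groups (some i) (some (i + 2))))])
      []

-- ===== PORT B =====
def groups_lines_from_digits_py_alt (digits : String) : List String :=
  if digits = "" then []
  else
    (PySem.List.pyRange 0 (PySem.Str.len digits) 8).foldl
      (fun lines i =>
        let block := PySem.Str.slice digits (some i) (some (i + 8))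
        let line :=
          if PySem.Str.len block ≤ 4 then PySem.Str.slice block none (some 4)
          else PySem.Str.slice block none (some 4) ++ " " ++ PySem.Str.slice block (some 4) none
        lines ++ [PySem.Str.rstrip line])
      []

-- ===== PRECONDITION & SPEC =====
def Spec_groups_lines_from_digits_py (digits : String) (out : List String) : Prop := out = groups_lines_from_digits_py_alt digits
instance (digits : String) (out : List String) : Decidable (Spec_groups_lines_from_digits_py digits out) := by unfold Spec_groups_lines_from_digits_py; infer_instance

-- ===== CLAIM (what is proved, stated in full; the proofs are below) =====
def Claim_equal_groups_lines_from_digits_py : Prop := ∀ (digits : String), Dom_groups_lines_from_digits_py digits → Spec_groups_lines_from_digits_py digits (groups_lines_from_digits_py digits)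

-- ===== LEMMAS AND PROOFS =====

-- generic chunking with chunk size k+1
def pvChunkMap {α β : Type} (F : List α → β) (k : Nat) (xs : List α) : List β :=
  if h : xs = [] then []
  else F (xs.take (k + 1)) :: pvChunkMap F k (xs.drop (k + 1))
termination_by xs.length
decreasing_by
  simp only [List.length_drop]
  have := List.length_pos_of_ne_nil h
  omega

theorem pvChunkMap_nil {α β : Type} (F : List α → β) (k : Nat) : pvChunkMap F k [] = [] := by
  simp [pvChunkMap]

theorem pvChunkMap_cons {α β : Type} (F : List α → β) (k : Nat) (xs : List α) (h : xs ≠ []) :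
    pvChunkMap F k xs = F (xs.take (k + 1)) :: pvChunkMap F k (xs.drop (k + 1)) := by
  rw [pvChunkMap]; simp [h]

-- the range/drop/take form of a chunking loop IS pvChunkMap
theorem pvChunkMap_eq {α β : Type} (F : List α → β) (k : Nat) (xs : List α) :
    (List.range ((xs.length + k) / (k + 1))).map
      (fun j => F ((xs.drop ((k + 1) * j)).take (k + 1))) = pvChunkMap F k xs := by
  generalize hn : xs.length = n
  induction n using Nat.strong_induction_on generalizing xs with
  | _ n ih =>
    by_cases h : xs = []
    · subst h
      simp at hn
      subst hn
      have h0 : (0 + k) / (k + 1) = 0 := by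
        rw [Nat.zero_add]; exact Nat.div_eq_of_lt (Nat.lt_succ_self k)
      rw [h0, pvChunkMap_nil]
      simp
    · have hpos : 0 < n := hn ▸ List.length_pos_of_ne_nil h
      rw [pvChunkMap_cons F k xs h]
      have hceil : (n + k) / (k + 1) = (n - 1) / (k + 1) + 1 := by
        have hw : n + k = (n - 1) + (k + 1) := by omega
        rw [hw, Nat.add_div_right _ (Nat.succ_pos k)]
      rw [hceil, List.range_succ_eq_map, List.map_cons, List.map_map]
      congr 1
      have hdrop : (xs.drop (k + 1)).length = n - (k + 1) := by simp [hn]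
      rw [← ih (n - (k + 1)) (by omega) (xs.drop (k + 1)) hdrop]
      have hcnt : (n - (k + 1) + k) / (k + 1) = (n - 1) / (k + 1) := by
        rcases Nat.lt_or_ge n (k + 1) with hlt | hge
        · have h1 : n - (k + 1) + k = k := by omega
          rw [h1, Nat.div_eq_of_lt (by omega), Nat.div_eq_of_lt (by omega)]
        · congr 1
          omega
      rw [hcnt]
      apply List.map_congr_left
      intro j _
      simp only [Function.comp]
      rw [List.drop_drop]
      congr 3
      simp only [Nat.succ_eq_add_one]
      ring

-- A's per-line function (join a pair of groups with ' ', then rstrip), on char lists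
def pvF2 (gs : List (List Char)) : List Char :=
  PySem.Chars.rstrip (PySem.Chars.join [' '] gs)

-- B's per-line function on one 8-char block
def pvLineF (b : List Char) : List Char :=
  PySem.Chars.rstrip (if b.length ≤ 4 then b.take 4 else b.take 4 ++ ' ' :: b.drop 4)

-- the heart: pairing A's 4-char groups is the same as B's direct 8-char blocks
theorem pvCore_eq (cs : List Char) :
    pvChunkMap pvF2 1 (pvChunkMap id 3 cs) = pvChunkMap pvLineF 7 cs := by
  generalize hn : cs.length = n
  induction n using Nat.strong_induction_on generalizing cs with
  | _ n ih =>
    by_cases h : cs = []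
    · subst h; simp [pvChunkMap_nil]
    · have hpos : 0 < cs.length := List.length_pos_of_ne_nil h
      rw [pvChunkMap_cons id 3 cs h]
      by_cases h4 : cs.drop 4 = []
      · have hlen4 : cs.length ≤ 4 := by
          have := congrArg List.length h4; simp at this; omega
        rw [h4, pvChunkMap_nil, pvChunkMap_cons pvF2 1 _ (by simp), pvChunkMap_cons pvLineF 7 cs h]
        have h8 : cs.drop 8 = [] := List.drop_eq_nil_of_le (by omega)
        rw [h8, pvChunkMap_nil]
        simp only [List.take_succ_cons, List.take_nil, List.drop_succ_cons, List.drop_nil,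
          pvChunkMap_nil]
        congr 1
        simp only [pvF2, pvLineF, id]
        rw [List.take_of_length_le (show cs.length ≤ 3 + 1 by omega),
          List.take_of_length_le (show cs.length ≤ 7 + 1 by omega),
          if_pos hlen4, PySem.Chars.join_singleton, List.take_of_length_le hlen4]
      · have hlen4 : 4 < cs.length := by
          by_contra hc
          exact h4 (List.drop_eq_nil_of_le (by omega))
        rw [pvChunkMap_cons id 3 _ h4, pvChunkMap_cons pvF2 1 _ (by simp),
          pvChunkMap_cons pvLineF 7 cs h]
        simp only [List.take_succ_cons, List.drop_succ_cons, List.drop_drop]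
        congr 1
        · simp only [pvF2, pvLineF, id]
          have hbl : ¬ (cs.take 8).length ≤ 4 := by simp; omega
          rw [if_neg hbl, List.take_take, List.drop_take]
          simp [PySem.Chars.join_cons_cons, PySem.Chars.join_singleton]
        · have h48 : (4 : Nat) + 4 = 8 := rfl
          rw [h48]
          exact ih (cs.drop 8).length (by simp [hn]; omega) (cs.drop 8) rfl

-- flatMap of singletons is map (the appended-singleton loop body)
theorem pvFlatMapSingleton {α β : Type} (f : α → β) (l : List α) :
    (l.flatMap fun x => [f x]) = l.map f := by
  induction l with
  | nil => rfl
  | cons a l ih => simp [List.flatMap_cons, ih]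

-- Str.slice at natural bounds builds the drop/take chunk
theorem pvStrSliceChunk (s : String) (j n : Nat) :
    PySem.Str.slice s (some ((j : Nat) : Int)) (some (((j : Nat) : Int) + ((n : Nat) : Int)))
      = String.ofList ((s.toList.drop j).take n) := by
  rw [← String.toList_inj]
  simp [PySem.Str.toList_slice, PySem.List.slice_natCast_add]

theorem pvPortB_eq (digits : String) :
    groups_lines_from_digits_py_alt digits
      = (pvChunkMap pvLineF 7 digits.toList).map String.ofList := by
  by_cases h : digits = ""
  · subst h; simp [groups_lines_from_digits_py_alt, pvChunkMap_nil]
  · have hcs : digits.toList ≠ [] := by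
      intro hc; exact h (by rw [← String.toList_inj]; simpa using hc)
    have hpos : 0 < digits.toList.length := List.length_pos_of_ne_nil hcs
    rw [← pvChunkMap_eq pvLineF 7 digits.toList]
    simp only [show (7 : Nat) + 1 = 8 by norm_num]
    unfold groups_lines_from_digits_py_alt
    rw [if_neg h]
    rw [PySem.List.foldl_append_eq_flatMap]
    rw [PySem.List.pyRange_of_pos 0 (PySem.Str.len digits) (show (0:Int) < 8 by norm_num)]
    simp only [PySem.Str.len_eq]
    rw [if_pos (by exact_mod_cast hpos)]
    have hcnt : (((digits.toList.length : Int) - 0 + 8 - 1) / 8).toNat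
        = (digits.toList.length + 7) / 8 := by omega
    rw [hcnt]
    simp only [List.nil_append, List.flatMap_map, List.map_map, pvFlatMapSingleton]
    apply List.map_congr_left
    intro j hj
    simp only [Function.comp, zero_add]
    rw [← String.toList_inj]
    have e88 : (8 * (j:Int)) = (((8*j : Nat)):Int) := by push_cast; ring
    have e8p' : ((((8*j:Nat)):Int) + (8:Int)) = (((8*j : Nat)):Int) + ((8:Nat):Int) := by norm_num
    rw [e88, e8p', pvStrSliceChunk digits (8*j) 8]
    simp [pysem, pvLineF]
    congr 1
    rw [apply_ite String.toList]
    split <;> simp [pysem]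

theorem pvPortA_eq (digits : String) :
    groups_lines_from_digits_py digits
      = (pvChunkMap pvF2 1 (pvChunkMap id 3 digits.toList)).map String.ofList := by
  by_cases h : digits = ""
  · subst h; simp [groups_lines_from_digits_py, pvChunkMap_nil]
  · have hcs : digits.toList ≠ [] := by
      intro hc; exact h (by rw [← String.toList_inj]; simpa using hc)
    have hpos : 0 < digits.toList.length := List.length_pos_of_ne_nil hcs
    have hG : (List.range ((digits.toList.length + 3) / 4)).map
        (fun j => id ((digits.toList.drop (4*j)).take 4)) = pvChunkMap id 3 digits.toList := by
      rw [← pvChunkMap_eq id 3 digits.toList]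
    unfold groups_lines_from_digits_py
    rw [if_neg h]
    rw [PySem.List.pyRange_of_pos 0 (PySem.Str.len digits) (show (0:Int) < 4 by norm_num)]
    simp only [PySem.Str.len_eq]
    rw [if_pos (by exact_mod_cast hpos)]
    have hcnt4 : (((digits.toList.length : Int) - 0 + 4 - 1) / 4).toNat
        = (digits.toList.length + 3) / 4 := by omega
    rw [hcnt4, List.map_map]
    have hgfun : ((fun i => PySem.Str.slice digits (some i) (some (i + 4))) ∘
        (fun k : Nat => (0:Int) + 4 * k))
        = (String.ofList ∘ (fun j : Nat => id ((digits.toList.drop (4*j)).take 4))) := by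
      funext j
      simp only [Function.comp, zero_add, id]
      have e44 : (4 * (j:Int)) = (((4*j : Nat)):Int) := by push_cast; ring
      have e4p' : ((((4*j:Nat)):Int) + (4:Int)) = (((4*j : Nat)):Int) + ((4:Nat):Int) := by norm_num
      rw [e44, e4p', pvStrSliceChunk digits (4*j) 4]
    rw [hgfun, ← List.map_map, hG]
    rw [← pvChunkMap_eq pvF2 1 (pvChunkMap id 3 digits.toList)]
    simp only [show (1 : Nat) + 1 = 2 by norm_num]
    rw [PySem.List.foldl_append_eq_flatMap]
    rw [PySem.List.pyRange_of_pos 0 _ (show (0:Int) < 2 by norm_num)]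
    have hGpos : 0 < ((pvChunkMap id 3 digits.toList).map String.ofList).length := by
      rw [← hG]
      simp only [List.length_map, List.length_range]
      omega
    rw [if_pos (by exact_mod_cast hGpos)]
    have hcnt2 : ((((((pvChunkMap id 3 digits.toList).map String.ofList).length : Int)) - 0 + 2 - 1) / 2).toNat
        = ((pvChunkMap id 3 digits.toList).length + 1) / 2 := by
      simp only [List.length_map]
      omega
    rw [hcnt2]
    simp only [List.nil_append, List.flatMap_map, List.map_map, pvFlatMapSingleton]
    apply List.map_congr_left
    intro j hj
    simp only [Function.comp, zero_add]
    rw [← String.toList_inj]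
    have e22 : (2 * (j:Int)) = (((2*j : Nat)):Int) := by push_cast; ring
    have e2p' : ((((2*j:Nat)):Int) + (2:Int)) = (((2*j : Nat)):Int) + ((2:Nat):Int) := by norm_num
    rw [e22, e2p', PySem.List.slice_natCast_add]
    rw [← List.map_drop, ← List.map_take]
    simp [pysem, pvF2, PySem.Str.toList_join, List.map_map, Function.comp_def]

-- ===== VERDICT (by name: the statement is the Claim_ definition above) =====
theorem groups_lines_from_digits_py_spec : Claim_equal_groups_lines_from_digits_py := by
  intro digits _
  unfold Spec_groups_lines_from_digits_py
  rw [pvPortA_eq, pvCore_eq, ← pvPortB_eq]
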